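-- pv_equiv track=rewrite | github.com/matt1260/OT-Hebrew-Web-Translator | translate/translator.py | get_next_book
-- ===== SOURCE A (Python) =====
-- book_abbreviations = {
--     'Genesis': 'Gen',
--     'Exodus': 'Exo',
--     'Leviticus': 'Lev',
--     'Numbers': 'Num',
--     'Deuteronomy': 'Deu',
--     'Joshua': 'Jos',
--     'Judges': 'Jdg',
--     'Ruth': 'Rut',
--     '1 Samuel': '1Sa',
--     '2 Samuel': '2Sa',
--     '1 Kings': '1Ki',
--     '2 Kings': '2Ki',
--     '1 Chronicles': '1Ch',
--     '2 Chronicles': '2Ch',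
--     'Ezra': 'Ezr',
--     'Nehemiah': 'Neh',
--     'Esther': 'Est',
--     'Job': 'Job',
--     'Psalms': 'Psa',
--     'Proverbs': 'Pro',
--     'Ecclesiastes': 'Ecc',
--     'Song of Solomon': 'Sng',
--     'Isaiah': 'Isa',
--     'Jeremiah': 'Jer',
--     'Lamentations': 'Lam',
--     'Ezekiel': 'Eze',
--     'Daniel': 'Dan',
--     'Hosea': 'Hos',
--     'Joel': 'Joe',
--     'Amos': 'Amo',
--     'Obadiah': 'Oba',
--     'Jonah': 'Jon',
--     'Micah': 'Mic',
--     'Nahum': 'Nah',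
--     'Habakkuk': 'Hab',
--     'Zephaniah': 'Zep',
--     'Haggai': 'Hag',
--     'Zechariah': 'Zec',
--     'Malachi': 'Mal',
--     'Matthew': 'Mat',
--     'Mark': 'Mar',
--     'Luke': 'Luk',
--     'John': 'Joh',
--     'Acts': 'Act',
--     'Romans': 'Rom',
--     '1 Corinthians': '1Co',
--     '2 Corinthians': '2Co',
--     'Galatians': 'Gal',
--     'Ephesians': 'Eph',
--     'Philippians': 'Php',
--     'Colossians': 'Col',
--     '1 Thessalonians': '1Th',
--     '2 Thessalonians': '2Th',
--     '1 Timothy': '1Ti',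
--     '2 Timothy': '2Ti',
--     'Titus': 'Tit',
--     'Philemon': 'Phm',
--     'Hebrews': 'Heb',
--     'James': 'Jam',
--     '1 Peter': '1Pe',
--     '2 Peter': '2Pe',
--     '1 John': '1Jo',
--     '2 John': '2Jo',
--     '3 John': '3Jo',
--     'Jude': 'Jud',
--     'Revelation': 'Rev'
-- }
--
-- def get_next_book(abbreviation):
--     for book, abbrev in book_abbreviations.items():
--         if abbrev == abbreviation:
--             books = list(book_abbreviations.keys())
--
--             current_index = list(book_abbreviations.values()).index(abbrev)
--
--             if current_index < len(books) - 1: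
--                 next_book = books[current_index + 1]
--                 return next_book
--             else:
--                 return None
--     return None
-- ===== SOURCE B (Python) =====
-- # Canonical order stored as two compact CSV strings; a next-book map is built
-- # once at import time, so each call is a single dict lookup.
-- _ABBREVS = ("Gen,Exo,Lev,Num,Deu,Jos,Jdg,Rut,1Sa,2Sa,1Ki,2Ki,1Ch,2Ch,Ezr,Neh,"
--             "Est,Job,Psa,Pro,Ecc,Sng,Isa,Jer,Lam,Eze,Dan,Hos,Joe,Amo,Oba,Jon,"
--             "Mic,Nah,Hab,Zep,Hag,Zec,Mal,Mat,Mar,Luk,Joh,Act,Rom,1Co,2Co,Gal,"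
--             "Eph,Php,Col,1Th,2Th,1Ti,2Ti,Tit,Phm,Heb,Jam,1Pe,2Pe,1Jo,2Jo,3Jo,"
--             "Jud,Rev")
-- _BOOKS = ("Genesis,Exodus,Leviticus,Numbers,Deuteronomy,Joshua,Judges,Ruth,"
--           "1 Samuel,2 Samuel,1 Kings,2 Kings,1 Chronicles,2 Chronicles,Ezra,"
--           "Nehemiah,Esther,Job,Psalms,Proverbs,Ecclesiastes,Song of Solomon,"
--           "Isaiah,Jeremiah,Lamentations,Ezekiel,Daniel,Hosea,Joel,Amos,"
--           "Obadiah,Jonah,Micah,Nahum,Habakkuk,Zephaniah,Haggai,Zechariah,"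
--           "Malachi,Matthew,Mark,Luke,John,Acts,Romans,1 Corinthians,"
--           "2 Corinthians,Galatians,Ephesians,Philippians,Colossians,"
--           "1 Thessalonians,2 Thessalonians,1 Timothy,2 Timothy,Titus,"
--           "Philemon,Hebrews,James,1 Peter,2 Peter,1 John,2 John,3 John,"
--           "Jude,Revelation")
--
-- # abbreviation -> name of the following book; the last abbreviation ('Rev')
-- # gets no pair because _BOOKS[1:] is one shorter, so .get returns None there.
-- next_book_map = dict(zip(_ABBREVS.split(','), _BOOKS.split(',')[1:]))
--
--
-- def get_next_book(abbreviation):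
--     return next_book_map.get(abbreviation)
-- ===== Notes on version B (the rewrite author's own statement) =====
-- stated objective: idiomatic
-- what changed: Stores the canonical order as two compact CSV strings split once at import time into a precomputed abbreviation->next-book dict, so the call is a single .get lookup instead of A's items-loop plus a list(values).index rescan.
import Mathlib
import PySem

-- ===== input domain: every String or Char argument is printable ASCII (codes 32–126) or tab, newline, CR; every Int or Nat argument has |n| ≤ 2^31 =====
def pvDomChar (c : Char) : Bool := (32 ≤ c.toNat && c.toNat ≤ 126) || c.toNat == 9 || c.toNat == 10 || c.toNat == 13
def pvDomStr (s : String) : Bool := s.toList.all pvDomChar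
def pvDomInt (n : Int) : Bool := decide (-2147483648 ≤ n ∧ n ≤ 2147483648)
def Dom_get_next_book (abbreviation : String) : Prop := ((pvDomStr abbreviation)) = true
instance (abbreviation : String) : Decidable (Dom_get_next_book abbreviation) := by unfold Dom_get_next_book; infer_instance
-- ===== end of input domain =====

-- B stores the canonical order as two CSV strings split once into a precomputed abbreviation -> next-book map; one lookup per call.

-- ===== PORT A =====
-- The module-level dict book_abbreviations, as its insertion-ordered (book, abbrev) items.
def bookAbbreviations : List (String × String) := [
  ("Genesis", "Gen"), ("Exodus", "Exo"), ("Leviticus", "Lev"), ("Numbers", "Num"),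
  ("Deuteronomy", "Deu"), ("Joshua", "Jos"), ("Judges", "Jdg"), ("Ruth", "Rut"),
  ("1 Samuel", "1Sa"), ("2 Samuel", "2Sa"), ("1 Kings", "1Ki"), ("2 Kings", "2Ki"),
  ("1 Chronicles", "1Ch"), ("2 Chronicles", "2Ch"), ("Ezra", "Ezr"), ("Nehemiah", "Neh"),
  ("Esther", "Est"), ("Job", "Job"), ("Psalms", "Psa"), ("Proverbs", "Pro"),
  ("Ecclesiastes", "Ecc"), ("Song of Solomon", "Sng"), ("Isaiah", "Isa"), ("Jeremiah", "Jer"),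
  ("Lamentations", "Lam"), ("Ezekiel", "Eze"), ("Daniel", "Dan"), ("Hosea", "Hos"),
  ("Joel", "Joe"), ("Amos", "Amo"), ("Obadiah", "Oba"), ("Jonah", "Jon"),
  ("Micah", "Mic"), ("Nahum", "Nah"), ("Habakkuk", "Hab"), ("Zephaniah", "Zep"),
  ("Haggai", "Hag"), ("Zechariah", "Zec"), ("Malachi", "Mal"), ("Matthew", "Mat"),
  ("Mark", "Mar"), ("Luke", "Luk"), ("John", "Joh"), ("Acts", "Act"),
  ("Romans", "Rom"), ("1 Corinthians", "1Co"), ("2 Corinthians", "2Co"), ("Galatians", "Gal"),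
  ("Ephesians", "Eph"), ("Philippians", "Php"), ("Colossians", "Col"), ("1 Thessalonians", "1Th"),
  ("2 Thessalonians", "2Th"), ("1 Timothy", "1Ti"), ("2 Timothy", "2Ti"), ("Titus", "Tit"),
  ("Philemon", "Phm"), ("Hebrews", "Heb"), ("James", "Jam"), ("1 Peter", "1Pe"),
  ("2 Peter", "2Pe"), ("1 John", "1Jo"), ("2 John", "2Jo"), ("3 John", "3Jo"),
  ("Jude", "Jud"), ("Revelation", "Rev")]

-- the 'for book, abbrev in book_abbreviations.items():' loop of A, step for step
def getNextBookLoop (abbreviation : String) : List (String × String) → Option String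
  | [] => none                                   -- loop falls through: return None
  | (_, abv) :: rest =>
    if abv == abbreviation then
      let books := bookAbbreviations.map Prod.fst            -- list(book_abbreviations.keys())
      match PySem.List.index? (bookAbbreviations.map Prod.snd) abv with  -- list(values()).index(abbrev)
      | some currentIndex =>
        if currentIndex < books.length - 1 then
          books[currentIndex + 1]?               -- books[current_index + 1]; in range by the guard, so 'some next_book'
        else
          none                                   -- return None
      | none => none                             -- unreachable: abbrev is among the values (.index cannot raise)
    else getNextBookLoop abbreviation rest

def get_next_book (abbreviation : String) : Option String :=
  getNextBookLoop abbreviation bookAbbreviations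

-- ===== PORT B =====
-- _ABBREVS and _BOOKS: the canonical order packed as CSV strings
def pvAbbrevsCSV : String := "Gen,Exo,Lev,Num,Deu,Jos,Jdg,Rut,1Sa,2Sa,1Ki,2Ki,1Ch,2Ch,Ezr,Neh,Est,Job,Psa,Pro,Ecc,Sng,Isa,Jer,Lam,Eze,Dan,Hos,Joe,Amo,Oba,Jon,Mic,Nah,Hab,Zep,Hag,Zec,Mal,Mat,Mar,Luk,Joh,Act,Rom,1Co,2Co,Gal,Eph,Php,Col,1Th,2Th,1Ti,2Ti,Tit,Phm,Heb,Jam,1Pe,2Pe,1Jo,2Jo,3Jo,Jud,Rev"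
def pvBooksCSV : String := "Genesis,Exodus,Leviticus,Numbers,Deuteronomy,Joshua,Judges,Ruth,1 Samuel,2 Samuel,1 Kings,2 Kings,1 Chronicles,2 Chronicles,Ezra,Nehemiah,Esther,Job,Psalms,Proverbs,Ecclesiastes,Song of Solomon,Isaiah,Jeremiah,Lamentations,Ezekiel,Daniel,Hosea,Joel,Amos,Obadiah,Jonah,Micah,Nahum,Habakkuk,Zephaniah,Haggai,Zechariah,Malachi,Matthew,Mark,Luke,John,Acts,Romans,1 Corinthians,2 Corinthians,Galatians,Ephesians,Philippians,Colossians,1 Thessalonians,2 Thessalonians,1 Timothy,2 Timothy,Titus,Philemon,Hebrews,James,1 Peter,2 Peter,1 John,2 John,3 John,Jude,Revelation"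

-- next_book_map = dict(zip(_ABBREVS.split(','), _BOOKS.split(',')[1:]))
-- s.split(',') with a non-empty separator: PySem.Chars.splitOn on the code points (exact)
def csvSplit (s : String) : List String :=
  (PySem.Chars.splitOn s.toList [',']).map String.ofList

def nextBookMap : PySem.Dict String String :=
  PySem.Dict.ofList ((csvSplit pvAbbrevsCSV).zip ((csvSplit pvBooksCSV).drop 1))   -- [1:] = drop 1

def get_next_book_alt (abbreviation : String) : Option String :=
  nextBookMap.get? abbreviation                  -- next_book_map.get(abbreviation)

-- ===== PRECONDITION & SPEC =====
def Spec_get_next_book (abbreviation : String) (out : Option String) : Prop := out = get_next_book_alt abbreviation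
instance (abbreviation : String) (out : Option String) : Decidable (Spec_get_next_book abbreviation out) := by unfold Spec_get_next_book; infer_instance

-- ===== CLAIM =====
def Claim_equal_get_next_book : Prop := ∀ (abbreviation : String), Dom_get_next_book abbreviation → Spec_get_next_book abbreviation (get_next_book abbreviation)

-- ===== LEMMAS AND PROOFS =====

-- the zipped pairs of B's map, evaluated once (proof-side helper, used only below)
def litNextPairs : List (String × String) := [
  ("Gen", "Exodus"),
  ("Exo", "Leviticus"),
  ("Lev", "Numbers"),
  ("Num", "Deuteronomy"),
  ("Deu", "Joshua"),
  ("Jos", "Judges"),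
  ("Jdg", "Ruth"),
  ("Rut", "1 Samuel"),
  ("1Sa", "2 Samuel"),
  ("2Sa", "1 Kings"),
  ("1Ki", "2 Kings"),
  ("2Ki", "1 Chronicles"),
  ("1Ch", "2 Chronicles"),
  ("2Ch", "Ezra"),
  ("Ezr", "Nehemiah"),
  ("Neh", "Esther"),
  ("Est", "Job"),
  ("Job", "Psalms"),
  ("Psa", "Proverbs"),
  ("Pro", "Ecclesiastes"),
  ("Ecc", "Song of Solomon"),
  ("Sng", "Isaiah"),
  ("Isa", "Jeremiah"),
  ("Jer", "Lamentations"),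
  ("Lam", "Ezekiel"),
  ("Eze", "Daniel"),
  ("Dan", "Hosea"),
  ("Hos", "Joel"),
  ("Joe", "Amos"),
  ("Amo", "Obadiah"),
  ("Oba", "Jonah"),
  ("Jon", "Micah"),
  ("Mic", "Nahum"),
  ("Nah", "Habakkuk"),
  ("Hab", "Zephaniah"),
  ("Zep", "Haggai"),
  ("Hag", "Zechariah"),
  ("Zec", "Malachi"),
  ("Mal", "Matthew"),
  ("Mat", "Mark"),
  ("Mar", "Luke"),
  ("Luk", "John"),
  ("Joh", "Acts"),
  ("Act", "Romans"),
  ("Rom", "1 Corinthians"),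
  ("1Co", "2 Corinthians"),
  ("2Co", "Galatians"),
  ("Gal", "Ephesians"),
  ("Eph", "Philippians"),
  ("Php", "Colossians"),
  ("Col", "1 Thessalonians"),
  ("1Th", "2 Thessalonians"),
  ("2Th", "1 Timothy"),
  ("1Ti", "2 Timothy"),
  ("2Ti", "Titus"),
  ("Tit", "Philemon"),
  ("Phm", "Hebrews"),
  ("Heb", "James"),
  ("Jam", "1 Peter"),
  ("1Pe", "2 Peter"),
  ("2Pe", "1 John"),
  ("1Jo", "2 John"),
  ("2Jo", "3 John"),
  ("3Jo", "Jude"),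
  ("Jud", "Revelation")
]

-- evaluate the CSV splits + zip of B's map once
set_option maxRecDepth 100000 in
set_option maxHeartbeats 4000000 in
theorem nextBookMap_eval : nextBookMap = PySem.Dict.ofList litNextPairs := by decide

-- A's loop returns None when no item's abbreviation matches.
theorem getNextBookLoop_of_not_mem (ab : String) (l : List (String × String))
    (h : ∀ p ∈ l, p.2 ≠ ab) : getNextBookLoop ab l = none := by
  induction l with
  | nil => rfl
  | cons p rest ih =>
    obtain ⟨b, v⟩ := p
    have hv : v ≠ ab := h (b, v) (List.mem_cons_self ..)
    simp only [getNextBookLoop, beq_iff_eq, if_neg hv]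
    exact ih (fun q hq => h q (List.mem_cons_of_mem _ hq))

-- both ports agree on every abbreviation that occurs among the values (finite check)
set_option maxRecDepth 100000 in
theorem agree_on_values :
    ∀ ab ∈ bookAbbreviations.map Prod.snd, get_next_book ab = get_next_book_alt ab := by
  simp only [get_next_book_alt, nextBookMap_eval]
  decide

-- on an abbreviation not among the values, B's map lookup misses too
set_option maxRecDepth 100000 in
theorem alt_of_not_mem (ab : String) (h : ab ∉ bookAbbreviations.map Prod.snd) :
    get_next_book_alt ab = none := by
  have hk : ∀ x ∈ nextBookMap.keys, x ∈ bookAbbreviations.map Prod.snd := by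
    rw [nextBookMap_eval]; decide
  have : ab ∉ nextBookMap.keys := fun hm => h (hk ab hm)
  simpa [get_next_book_alt] using (PySem.Dict.get?_eq_none_iff_not_mem_keys nextBookMap ab).mpr this

-- ===== VERDICT =====
theorem get_next_book_spec : Claim_equal_get_next_book := by
  intro ab _
  unfold Spec_get_next_book
  by_cases h : ab ∈ bookAbbreviations.map Prod.snd
  · exact agree_on_values ab h
  · rw [alt_of_not_mem ab h]
    exact getNextBookLoop_of_not_mem ab bookAbbreviations
      (fun p hp hpe => h (hpe ▸ List.mem_map_of_mem hp))
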